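-- pv_equiv track=rewrite | github.com/ryaneijae/advent | 2015/day01_NotQuiteLisp/day1.py | part1
-- ===== SOURCE A (Python) =====
-- def part1(text):
--     plus_one = 0
--     minus_one = 0
--     for each in text:
--         if each == '(':
--             plus_one += 1
--         else:
--             minus_one += 1
--     return plus_one - minus_one
-- ===== SOURCE B (Python) =====
-- def part1(text):
--     # Divide and conquer: the net count of a string is the sum of the net
--     # counts of its two halves; base cases are the empty string and one char.
--     if len(text) == 0:
--         return 0
--     if len(text) == 1:
--         return 1 if text == '(' else -1
--     mid = len(text) // 2
--     return part1(text[:mid]) + part1(text[mid:])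
-- ===== Notes on version B (the rewrite author's own statement) =====
-- stated objective: alternative
-- what changed: Replaced the single accumulator loop with a divide-and-conquer recursion that splits the string in half, solves each half recursively and adds the two net counts.
import Mathlib
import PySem

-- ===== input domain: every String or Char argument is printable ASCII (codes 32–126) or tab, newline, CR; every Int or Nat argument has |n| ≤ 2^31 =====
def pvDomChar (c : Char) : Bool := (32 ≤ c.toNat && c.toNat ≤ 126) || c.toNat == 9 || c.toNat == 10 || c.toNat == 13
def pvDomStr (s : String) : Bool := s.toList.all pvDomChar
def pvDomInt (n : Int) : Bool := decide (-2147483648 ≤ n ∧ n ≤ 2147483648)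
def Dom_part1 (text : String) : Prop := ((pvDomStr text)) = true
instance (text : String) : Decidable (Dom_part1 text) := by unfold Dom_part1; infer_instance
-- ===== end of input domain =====

-- B replaces A's accumulator loop with a divide-and-conquer recursion on string halves; objective: alternative.

-- ===== PORT A =====
def part1 (text : String) : Int :=
  let res := text.toList.foldl
    (fun (s : Int × Int) each => if each == '(' then (s.1 + 1, s.2) else (s.1, s.2 + 1))
    (0, 0)
  res.1 - res.2

-- ===== PORT B =====
-- Recursive helper on the character list; text[:mid] / text[mid:] with
-- 0 ≤ mid ≤ len are exactly List.take mid / List.drop mid (PySem.List.slice_to_natCast /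
-- slice_from_natCast), so the slices are ported as take/drop.
def part1Go (l : List Char) : Int :=
  if l.length = 0 then 0
  else if l.length = 1 then (if l = ['('] then 1 else -1)
  else
    let mid := l.length / 2
    part1Go (l.take mid) + part1Go (l.drop mid)
termination_by l.length
decreasing_by
  · simp only [List.length_take]; omega
  · simp only [List.length_drop]; omega

def part1_alt (text : String) : Int := part1Go text.toList

-- ===== PRECONDITION & SPEC =====
def Spec_part1 (text : String) (out : Int) : Prop := out = part1_alt text
instance (text : String) (out : Int) : Decidable (Spec_part1 text out) := by unfold Spec_part1; infer_instance

-- ===== CLAIM (what is proved, stated in full; the proofs are below) =====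
def Claim_equal_part1 : Prop := ∀ (text : String), Dom_part1 text → Spec_part1 text (part1 text)

-- ===== LEMMAS AND PROOFS =====

-- B's recursion computes the closed form 2*count('(') - length.
theorem part1Go_closed_aux : ∀ (n : Nat) (l : List Char), l.length = n →
    part1Go l = 2 * (l.count '(' : Int) - l.length := by
  intro n
  induction n using Nat.strong_induction_on with
  | _ n ih =>
    intro l hl
    rw [part1Go]
    by_cases h0 : l.length = 0
    · rw [if_pos h0]
      match l, h0 with
      | [], _ => simp
    · rw [if_neg h0]
      by_cases h1 : l.length = 1
      · rw [if_pos h1]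
        match l, h1 with
        | [c], _ =>
          by_cases hc : c = '('
          · subst hc; simp
          · simp [hc]
      · rw [if_neg h1]
        show part1Go (l.take (l.length / 2)) + part1Go (l.drop (l.length / 2)) =
          2 * (l.count '(' : Int) - l.length
        have hmid : l.length / 2 < l.length := by omega
        have hmid0 : 0 < l.length / 2 := by omega
        rw [ih (l.take (l.length / 2)).length (by subst hl; simp only [List.length_take]; omega) _ rfl,
            ih (l.drop (l.length / 2)).length (by subst hl; simp only [List.length_drop]; omega) _ rfl]
        have hcount : (l.take (l.length / 2)).count '(' + (l.drop (l.length / 2)).count '(' = l.count '(' := by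
          conv_rhs => rw [← List.take_append_drop (l.length / 2) l]
          rw [List.count_append]
        have hlen : (l.take (l.length / 2)).length + (l.drop (l.length / 2)).length = l.length := by
          simp only [List.length_take, List.length_drop]; omega
        omega

theorem part1Go_closed (l : List Char) :
    part1Go l = 2 * (l.count '(' : Int) - l.length :=
  part1Go_closed_aux l.length l rfl

-- Invariant of A's fold: the running difference.
theorem part1_fold_inv (l : List Char) :
    ∀ (a b : Int),
      ((l.foldl (fun (s : Int × Int) each =>
          if each == '(' then (s.1 + 1, s.2) else (s.1, s.2 + 1)) (a, b)).1
       - (l.foldl (fun (s : Int × Int) each =>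
          if each == '(' then (s.1 + 1, s.2) else (s.1, s.2 + 1)) (a, b)).2)
      = a - b + 2 * (l.count '(' : Int) - l.length := by
  induction l with
  | nil => intro a b; simp
  | cons h t ih =>
    intro a b
    simp only [beq_iff_eq] at ih ⊢
    by_cases hc : h = '('
    · subst hc
      simp only [List.foldl_cons, if_true]
      rw [ih (a + 1) b]
      simp
      ring
    · simp only [List.foldl_cons, if_neg hc]
      rw [ih a (b + 1)]
      simp [hc]
      ring

-- ===== VERDICT (by name: the statement is the Claim_ definition above) =====
theorem part1_spec : Claim_equal_part1 := by
  intro text _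
  unfold Spec_part1 part1 part1_alt
  rw [part1Go_closed]
  simpa using part1_fold_inv text.toList 0 0
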